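-- pv_equiv track=rewrite | github.com/Vanaudel/Machine-Learning---Complex-Algorithms | Enumeration - Min_Cost_Vertex_Coloring.py | min_cost_vertex_coloring_enumeration
-- ===== SOURCE A (Python) =====
-- from itertools import product
--
-- def min_cost_vertex_coloring_enumeration(costs):
--
--     def feasible_combination(combination):
--         for i in range(len(combination) - 1):
--             if combination[i] == combination[i+1]:
--                 return False
--         return True
--
--
--     def calculate_cost_combination(combination, costs):
--         total_cost = 0
--         for i in range(len(combination)):
--             node_number = i
--             node_color = combination[i]
--             total_cost = total_cost + costs[node_number][node_color]
--         return total_cost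
--
--
--     #Get all possible combinations
--     number_nodes = len(costs)
--     number_colors = len(costs[0])
--     #all_combinations = list(product(range(number_colors), range(number_colors), range(number_colors)))
--     all_combinations = list(product(range(number_colors), repeat=number_nodes))
--
--
--     #Enumerate list of feasible/valid combinations
--     #Feasible means that all adjacent nodes have different color
--     all_feasible_combinations = []
--     for combination in all_combinations:
--         if feasible_combination(combination):
--             all_feasible_combinations.append(combination)
--
--
--     #Calculate cost associated with each feasible/valid combination
--     cost_all_feasible_combinations = []
--     for combination in all_feasible_combinations:
--         cost_all_feasible_combinations.append(calculate_cost_combination(combination, costs))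
--
--
--     #Get the minimum cost combination and its corresponding minimum cost
--     min_cost = min(cost_all_feasible_combinations)
--     index_min_cost = cost_all_feasible_combinations.index(min_cost)
--
--     return min_cost, all_feasible_combinations[index_min_cost]
-- ===== SOURCE B (Python) =====
-- def min_cost_vertex_coloring_enumeration(costs):
--     k = len(costs[0])
--     # suffix DP: suf[i][c] = min cost of coloring nodes i..n-1 when node i gets color c
--     suf = []
--     below = None
--     for row in reversed(costs):
--         if below is None:
--             layer = [row[c] for c in range(k)]
--         else:
--             layer = [row[c] + min(below[d] for d in range(k) if d != c) for c in range(k)]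
--         suf.append(layer)
--         below = layer
--     suf.reverse()
--     total = min(suf[0])
--     # greedy reconstruction of the lexicographically smallest optimal coloring
--     colors = []
--     prev = -1
--     rem = total
--     for row, layer in zip(costs, suf):
--         c = next(c for c in range(k) if c != prev and layer[c] == rem)
--         colors.append(c)
--         rem -= row[c]
--         prev = c
--     return total, tuple(colors)
-- ===== Notes on version B (the rewrite author's own statement) =====
-- stated objective: faster
-- what changed: Replaced the exhaustive enumeration of all C^N colorings (filter feasible, cost each, take first minimum) by a suffix dynamic program over nodes x colors plus a greedy left-to-right reconstruction of the lexicographically smallest optimal coloring, which is exactly the first minimum in A's product enumeration order.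
-- outside the precondition, e.g. on min_cost_vertex_coloring_enumeration([]): A raises IndexError, B raises IndexError
import Mathlib
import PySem

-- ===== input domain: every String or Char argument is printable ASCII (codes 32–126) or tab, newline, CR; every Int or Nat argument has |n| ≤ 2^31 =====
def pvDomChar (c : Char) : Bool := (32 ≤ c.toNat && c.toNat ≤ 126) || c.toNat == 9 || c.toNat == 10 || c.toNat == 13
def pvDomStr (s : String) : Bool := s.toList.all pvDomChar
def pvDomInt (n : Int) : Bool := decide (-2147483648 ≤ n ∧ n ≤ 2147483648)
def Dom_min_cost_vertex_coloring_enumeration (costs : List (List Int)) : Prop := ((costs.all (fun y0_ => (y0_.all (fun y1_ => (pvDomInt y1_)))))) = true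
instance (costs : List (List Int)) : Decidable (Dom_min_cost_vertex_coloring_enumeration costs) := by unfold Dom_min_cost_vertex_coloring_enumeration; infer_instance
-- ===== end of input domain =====

-- B replaces A's exhaustive O(C^N·N) enumeration of all colorings by an O(N·C²) suffix DP with greedy
-- lexicographically-smallest reconstruction (objective: faster, asymptotic).

-- shared indexing primitive: Python's r[c] (total form; Pre_ keeps every access in range)
def pvIdx (r : List Int) (c : Int) : Int := PySem.List.pyGetD r c 0

-- ===== PORT A =====
-- itertools.product(range(k), repeat=n), first coordinate slowest
def pvCombosA (k : Int) : Nat → List (List Int)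
  | 0 => [[]]
  | n+1 => (PySem.List.pyRange 0 k 1).flatMap (fun c => (pvCombosA k n).map (fun t => c :: t))

-- feasible_combination: scan of adjacent pairs
def pvFeasibleA : List Int → Bool
  | c1 :: c2 :: rest => if c1 == c2 then false else pvFeasibleA (c2 :: rest)
  | _ => true

-- calculate_cost_combination: the loop reads combination[i] and costs[i] in step (lengths are equal
-- at every call site), rendered as the parallel structural recursion accumulating the same sum
def pvCostA : List Int → List (List Int) → Int
  | c :: cs, r :: rest => pvIdx r c + pvCostA cs rest
  | _, _ => 0

def min_cost_vertex_coloring_enumeration (costs : List (List Int)) : Int × List Int :=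
  let numberNodes := costs.length
  let numberColors : Int := ((PySem.List.pyGet? costs 0).getD []).length
  let allCombinations := pvCombosA numberColors numberNodes
  let feas := allCombinations.filter pvFeasibleA
  let cs := feas.map (fun comb => pvCostA comb costs)
  let minCost := (PySem.List.min? cs (fun x => x)).getD 0
  let i : Nat := (PySem.List.index? cs minCost).getD 0
  (minCost, feas.getD i [])

-- ===== PORT B =====
-- the 'for row in reversed(costs)' loop building the suffix DP table layer by layer
def pvSufB (k : Int) : List (List Int) → List (List Int)
  | [] => []
  | row :: rest =>
    match pvSufB k rest with
    | [] => [(PySem.List.pyRange 0 k 1).map (fun c => pvIdx row c)]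
    | below :: tl =>
      ((PySem.List.pyRange 0 k 1).map (fun c =>
        pvIdx row c +
          (PySem.List.min? (((PySem.List.pyRange 0 k 1).filter (fun d => d != c)).map
            (fun d => pvIdx below d)) (fun x => x)).getD 0))
        :: below :: tl

-- the 'for row, layer in zip(costs, suf)' reconstruction loop; state = (prev, rem)
def pvReconB (k : Int) : List (List Int × List Int) → Int → Int → List Int
  | [], _, _ => []
  | (row, layer) :: rest, prev, rem =>
    let c := ((PySem.List.pyRange 0 k 1).find? (fun c => c != prev && pvIdx layer c == rem)).getD 0
    c :: pvReconB k rest c (rem - pvIdx row c)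

def min_cost_vertex_coloring_enumeration_alt (costs : List (List Int)) : Int × List Int :=
  let k : Int := ((PySem.List.pyGet? costs 0).getD []).length
  let suf := pvSufB k costs
  let total := (PySem.List.min? (PySem.List.pyGetD suf 0 []) (fun x => x)).getD 0
  (total, pvReconB k (List.zip costs suf) (-1) total)

-- ===== PRECONDITION & SPEC =====
-- Pre_ = exactly the inputs where A returns: a nonempty cost matrix, at least one color, every row
-- at least as long as the first (else IndexError on costs[i][color]), and at least two colors unless
-- there is a single node (else min([]) raises ValueError: no feasible coloring exists).
def Pre_min_cost_vertex_coloring_enumeration (costs : List (List Int)) : Prop :=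
  costs ≠ [] ∧
  1 ≤ (costs.headD []).length ∧
  (2 ≤ (costs.headD []).length ∨ costs.length = 1) ∧
  ∀ r ∈ costs, (costs.headD []).length ≤ r.length
instance (costs : List (List Int)) : Decidable (Pre_min_cost_vertex_coloring_enumeration costs) := by
  unfold Pre_min_cost_vertex_coloring_enumeration; infer_instance

def pvWitness_min_cost_vertex_coloring_enumeration : List (List Int) := [[1, 2], [3, 4]]

def Spec_min_cost_vertex_coloring_enumeration (costs : List (List Int)) (out : Int × List Int) : Prop := out = min_cost_vertex_coloring_enumeration_alt costs
instance (costs : List (List Int)) (out : Int × List Int) : Decidable (Spec_min_cost_vertex_coloring_enumeration costs out) := by unfold Spec_min_cost_vertex_coloring_enumeration; infer_instance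

-- ===== CLAIM (what is proved, stated in full; the proofs are below) =====
def Claim_equal_min_cost_vertex_coloring_enumeration : Prop := ∀ (costs : List (List Int)), Dom_min_cost_vertex_coloring_enumeration costs → Pre_min_cost_vertex_coloring_enumeration costs → Spec_min_cost_vertex_coloring_enumeration costs (min_cost_vertex_coloring_enumeration costs)

-- ===== LEMMAS AND PROOFS =====

-- reference objects: candidate colors, minimum value, feasibility w.r.t. a previous color,
-- optimal suffix value, lexicographically-least optimal coloring
def pvMinI (l : List Int) : Int := (PySem.List.min? l (fun x => x)).getD 0

def pvCand (k prev : Int) : List Int := (PySem.List.pyRange 0 k 1).filter (fun c => c != prev)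

def pvFeasP : Int → List Int → Bool
  | _, [] => true
  | prev, c :: cs => (c != prev) && pvFeasP c cs

def pvValR (k : Int) (prev : Int) : List (List Int) → Int
  | [] => 0
  | r :: rest => pvMinI ((pvCand k prev).map (fun c => pvIdx r c + pvValR k c rest))

def pvPickR (k : Int) (prev : Int) : List (List Int) → List Int
  | [] => []
  | r :: rest =>
    (((pvCand k prev).find? (fun c => pvIdx r c + pvValR k c rest == pvValR k prev (r :: rest))).getD 0)
      :: pvPickR k (((pvCand k prev).find? (fun c => pvIdx r c + pvValR k c rest == pvValR k prev (r :: rest))).getD 0) rest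

def pvFeasList (k prev : Int) (n : Nat) : List (List Int) := (pvCombosA k n).filter (pvFeasP prev)

theorem pvMinI_spec {l : List Int} (h : l ≠ []) : pvMinI l ∈ l ∧ ∀ x ∈ l, pvMinI l ≤ x := by
  unfold pvMinI
  cases hm : PySem.List.min? l (fun x => x) with
  | none => exact absurd ((PySem.List.min?_eq_none_iff l _).mp hm) h
  | some m =>
    refine ⟨PySem.List.min?_mem hm, ?_⟩
    intro x hx
    simpa using PySem.List.min?_isMin hm x hx

theorem pvMinI_eq {l : List Int} {m : Int} (hm : m ∈ l) (hle : ∀ x ∈ l, m ≤ x) : pvMinI l = m := by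
  obtain ⟨h1, h2⟩ := pvMinI_spec (List.ne_nil_of_mem hm)
  exact le_antisymm (h2 m hm) (hle _ h1)

theorem mem_pvCand {k prev c : Int} : c ∈ pvCand k prev ↔ 0 ≤ c ∧ c < k ∧ c ≠ prev := by
  simp [pvCand, List.mem_filter, PySem.List.mem_pyRange_one, and_assoc]

theorem pvCand_ne_nil {k prev : Int} (h : 2 ≤ k ∨ (1 ≤ k ∧ prev < 0)) : pvCand k prev ≠ [] := by
  rcases h with h | ⟨h1, h2⟩
  · by_cases hp : prev = 0
    · exact List.ne_nil_of_mem (mem_pvCand.mpr ⟨by omega, by omega, by omega⟩ : (1:Int) ∈ _)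
    · exact List.ne_nil_of_mem (mem_pvCand.mpr ⟨le_refl 0, by omega, by omega⟩ : (0:Int) ∈ _)
  · exact List.ne_nil_of_mem (mem_pvCand.mpr ⟨le_refl 0, by omega, by omega⟩ : (0:Int) ∈ _)

theorem mem_pvCombosA {k : Int} : ∀ {n : Nat} {l : List Int}, l ∈ pvCombosA k n ↔
    l.length = n ∧ ∀ x ∈ l, 0 ≤ x ∧ x < k := by
  intro n
  induction n with
  | zero =>
    intro l
    simp only [pvCombosA, List.mem_singleton, List.length_eq_zero_iff]
    constructor
    · rintro rfl; simp
    · rintro ⟨rfl, _⟩; rfl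
  | succ n ih =>
    intro l
    simp only [pvCombosA, List.mem_flatMap, List.mem_map]
    constructor
    · rintro ⟨c, hc, t, ht, rfl⟩
      obtain ⟨hlen, hmem⟩ := ih.mp ht
      rw [PySem.List.mem_pyRange_one] at hc
      refine ⟨by simp [hlen], ?_⟩
      intro x hx
      rcases List.mem_cons.mp hx with rfl | hx
      · exact hc
      · exact hmem x hx
    · rintro ⟨hlen, hmem⟩
      cases l with
      | nil => simp at hlen
      | cons c t =>
        refine ⟨c, ?_, t, ?_, rfl⟩
        · rw [PySem.List.mem_pyRange_one]
          exact hmem c List.mem_cons_self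
        · exact ih.mpr ⟨by simpa using hlen, fun x hx => hmem x (List.mem_cons_of_mem _ hx)⟩

theorem pvFeasibleA_cons (c : Int) (cs : List Int) : pvFeasibleA (c :: cs) = pvFeasP c cs := by
  induction cs generalizing c with
  | nil => rfl
  | cons d ds ih =>
    by_cases h : c = d
    · subst h; simp [pvFeasibleA, pvFeasP]
    · have hne : (d != c) = true := by simp; exact fun h2 => h h2.symm
      simp [pvFeasibleA, pvFeasP, h, ih, hne]

theorem pvFilter_feasA {k : Int} (n : Nat) :
    (pvCombosA k n).filter pvFeasibleA = pvFeasList k (-1) n := by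
  unfold pvFeasList
  apply List.filter_congr
  intro l hl
  cases l with
  | nil => rfl
  | cons c cs =>
    have hc : (0:Int) ≤ c := ((mem_pvCombosA.mp hl).2 c List.mem_cons_self).1
    rw [pvFeasibleA_cons]
    show _ = ((c != (-1 : Int)) && pvFeasP c cs)
    have : (c != (-1 : Int)) = true := by simp; omega
    rw [this, Bool.true_and]

theorem pvFlatMap_filter {prev : Int} (L : Int → List (List Int)) : ∀ (cs : List Int),
    ((cs.flatMap (fun c => (L c).map (c :: ·))).filter (pvFeasP prev))
      = (cs.filter (fun c => c != prev)).flatMap (fun c => ((L c).filter (pvFeasP c)).map (c :: ·)) := by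
  intro cs
  induction cs with
  | nil => simp
  | cons c cs ih =>
    rw [List.flatMap_cons, List.filter_append, ih, List.filter_map]
    by_cases h : (c != prev) = true
    · have h1 : List.filter (fun c => c != prev) (c :: cs)
          = c :: List.filter (fun c => c != prev) cs := List.filter_cons_of_pos h
      rw [h1, List.flatMap_cons]
      congr 2
      apply List.filter_congr
      intro t _
      show ((c != prev) && pvFeasP c t) = pvFeasP c t
      rw [h, Bool.true_and]
    · have hf : (c != prev) = false := by simpa using h
      have h1 : List.filter (fun c => c != prev) (c :: cs)
          = List.filter (fun c => c != prev) cs := List.filter_cons_of_neg (by simp [hf])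
      have h2 : List.filter (pvFeasP prev ∘ fun x => c :: x) (L c) = [] := by
        apply List.filter_eq_nil_iff.mpr
        intro t _
        show ¬ ((c != prev) && pvFeasP c t) = true
        rw [hf, Bool.false_and]
        simp
      rw [h1, h2]
      simp

theorem pvFeasList_succ {k prev : Int} (n : Nat) :
    pvFeasList k prev (n+1) = (pvCand k prev).flatMap (fun c => (pvFeasList k c n).map (c :: ·)) := by
  unfold pvFeasList pvCand
  show ((PySem.List.pyRange 0 k 1).flatMap
      (fun c => (pvCombosA k n).map (c :: ·))).filter (pvFeasP prev) = _
  exact pvFlatMap_filter (fun _ => pvCombosA k n) _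

theorem mem_pvFeasList {k prev : Int} {n : Nat} {l : List Int} (h : l ∈ pvFeasList k prev n) :
    l.length = n ∧ pvFeasP prev l = true ∧ ∀ x ∈ l, 0 ≤ x ∧ x < k := by
  obtain ⟨h1, h2⟩ := List.mem_filter.mp h
  exact ⟨(mem_pvCombosA.mp h1).1, h2, (mem_pvCombosA.mp h1).2⟩

theorem pvVal_lower {k : Int} : ∀ (rows : List (List Int)) (prev : Int) (l : List Int),
    l ∈ pvFeasList k prev rows.length → pvValR k prev rows ≤ pvCostA l rows := by
  intro rows
  induction rows with
  | nil =>
    intro prev l hl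
    have := (mem_pvFeasList hl).1
    simp only [List.length_nil, List.length_eq_zero_iff] at this
    subst this
    simp [pvValR, pvCostA]
  | cons r rest ih =>
    intro prev l hl
    rw [List.length_cons, pvFeasList_succ] at hl
    obtain ⟨c, hc, t, ht, rfl⟩ := by
      simpa only [List.mem_flatMap, List.mem_map] using hl
    have h1 : pvCostA (c :: t) (r :: rest) = pvIdx r c + pvCostA t rest := rfl
    have h2 : pvIdx r c + pvValR k c rest ≤ pvCostA (c :: t) (r :: rest) := by
      rw [h1]
      have := ih c t ht
      omega
    refine le_trans ?_ h2
    show pvValR k prev (r :: rest) ≤ _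
    have hmem : pvIdx r c + pvValR k c rest ∈
        (pvCand k prev).map (fun c => pvIdx r c + pvValR k c rest) :=
      List.mem_map.mpr ⟨c, hc, rfl⟩
    exact (pvMinI_spec (List.ne_nil_of_mem hmem)).2 _ hmem

theorem pvVal_attain {k : Int} : ∀ (rows : List (List Int)) (prev : Int),
    (rows ≠ [] → pvCand k prev ≠ []) → (2 ≤ k ∨ rows.length ≤ 1) →
    ∃ l ∈ pvFeasList k prev rows.length, pvCostA l rows = pvValR k prev rows := by
  intro rows
  induction rows with
  | nil =>
    intro prev _ _
    refine ⟨[], ?_, rfl⟩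
    simp [pvFeasList, pvCombosA, pvFeasP]
  | cons r rest ih =>
    intro prev hne ht
    have hcand : pvCand k prev ≠ [] := hne (List.cons_ne_nil _ _)
    have hmapne : (pvCand k prev).map (fun c => pvIdx r c + pvValR k c rest) ≠ [] := by
      simpa using hcand
    have hval : pvValR k prev (r :: rest) ∈
        (pvCand k prev).map (fun c => pvIdx r c + pvValR k c rest) :=
      (pvMinI_spec hmapne).1
    obtain ⟨c, hc, hfc⟩ := List.mem_map.mp hval
    have hne' : rest ≠ [] → pvCand k c ≠ [] := by
      intro hr
      have hk2 : 2 ≤ k := by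
        rcases ht with h | h
        · exact h
        · cases rest with
          | nil => exact absurd rfl hr
          | cons a b => simp at h
      exact pvCand_ne_nil (Or.inl hk2)
    have ht' : 2 ≤ k ∨ rest.length ≤ 1 := by
      rcases ht with h | h
      · exact Or.inl h
      · right; simp only [List.length_cons] at h; omega
    obtain ⟨t, htmem, htcost⟩ := ih c hne' ht'
    refine ⟨c :: t, ?_, ?_⟩
    · rw [List.length_cons, pvFeasList_succ]
      exact List.mem_flatMap.mpr ⟨c, hc, List.mem_map.mpr ⟨t, htmem, rfl⟩⟩
    · show pvIdx r c + pvCostA t rest = _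
      rw [htcost, hfc]

theorem pvVal_min {k : Int} (rows : List (List Int)) (prev : Int)
    (hne : rows ≠ [] → pvCand k prev ≠ []) (ht : 2 ≤ k ∨ rows.length ≤ 1) :
    pvMinI ((pvFeasList k prev rows.length).map (fun l => pvCostA l rows)) = pvValR k prev rows := by
  obtain ⟨l, hl, hcost⟩ := pvVal_attain rows prev hne ht
  apply pvMinI_eq
  · exact List.mem_map.mpr ⟨l, hl, hcost⟩
  · intro x hx
    obtain ⟨t, htmem, rfl⟩ := List.mem_map.mp hx
    exact pvVal_lower rows prev t htmem

theorem pvFind?_ext {α : Type} (l : List α) (p q : α → Bool) (h : ∀ x ∈ l, p x = q x) :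
    l.find? p = l.find? q := by
  induction l with
  | nil => rfl
  | cons x xs ih =>
    simp only [List.find?_cons]
    rw [h x List.mem_cons_self]
    cases q x
    · exact ih (fun y hy => h y (List.mem_cons_of_mem _ hy))
    · rfl

theorem pvFind?_filter {α : Type} (l : List α) (p q : α → Bool) :
    (l.filter p).find? q = l.find? (fun x => p x && q x) := by
  induction l with
  | nil => rfl
  | cons x xs ih =>
    by_cases h : p x = true
    · rw [List.filter_cons_of_pos h]
      simp only [List.find?_cons, h, Bool.true_and]
      cases q x
      · exact ih
      · rfl
    · rw [List.filter_cons_of_neg (by simpa using h)]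
      simp only [List.find?_cons, Bool.not_eq_true] at *
      rw [h, Bool.false_and]
      exact ih

theorem pvPick_first {k : Int} : ∀ (rows : List (List Int)) (prev : Int),
    (rows ≠ [] → pvCand k prev ≠ []) → (2 ≤ k ∨ rows.length ≤ 1) →
    (pvFeasList k prev rows.length).find? (fun l => pvCostA l rows == pvValR k prev rows)
      = some (pvPickR k prev rows) := by
  intro rows
  induction rows with
  | nil =>
    intro prev _ _
    have h0 : pvFeasList k prev 0 = [[]] := by
      simp [pvFeasList, pvCombosA, pvFeasP]
    rw [List.length_nil, h0]
    rfl
  | cons r rest ih =>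
    intro prev hne ht
    have hcand : pvCand k prev ≠ [] := hne (List.cons_ne_nil _ _)
    have hne' : rest ≠ [] → ∀ c : Int, pvCand k c ≠ [] := by
      intro hr c
      have hk2 : 2 ≤ k := by
        rcases ht with h | h
        · exact h
        · cases rest with
          | nil => exact absurd rfl hr
          | cons a b => simp at h
      exact pvCand_ne_nil (Or.inl hk2)
    have ht' : 2 ≤ k ∨ rest.length ≤ 1 := by
      rcases ht with h | h
      · exact Or.inl h
      · right; simp only [List.length_cons] at h; omega
    have hmapne : (pvCand k prev).map (fun c => pvIdx r c + pvValR k c rest) ≠ [] := by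
      simpa using hcand
    have hlow : ∀ c ∈ pvCand k prev,
        pvValR k prev (r :: rest) ≤ pvIdx r c + pvValR k c rest := by
      intro c hc
      exact (pvMinI_spec hmapne).2 _ (List.mem_map.mpr ⟨c, hc, rfl⟩)
    -- the block-by-block scan
    have aux : ∀ cs : List Int, (∀ c ∈ cs, pvValR k prev (r :: rest) ≤ pvIdx r c + pvValR k c rest) →
        (cs.flatMap (fun c => (pvFeasList k c rest.length).map (c :: ·))).find?
            (fun l => pvCostA l (r :: rest) == pvValR k prev (r :: rest))
          = (cs.find? (fun c => pvIdx r c + pvValR k c rest == pvValR k prev (r :: rest))).map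
              (fun c => c :: pvPickR k c rest) := by
      intro cs
      induction cs with
      | nil => intro _; rfl
      | cons c cs ihcs =>
        intro hcs
        rw [List.flatMap_cons, List.find?_append, List.find?_map, List.find?_cons]
        by_cases hfc : (pvIdx r c + pvValR k c rest == pvValR k prev (r :: rest)) = true
        · rw [beq_iff_eq] at hfc
          have hinner : ((pvFeasList k c rest.length).find?
              ((fun l => pvCostA l (r :: rest) == pvValR k prev (r :: rest)) ∘ (c :: ·)))
              = some (pvPickR k c rest) := by
            have hext : ∀ t ∈ pvFeasList k c rest.length,
                ((fun l => pvCostA l (r :: rest) == pvValR k prev (r :: rest)) ∘ (c :: ·)) t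
                  = (pvCostA t rest == pvValR k c rest) := by
              intro t _
              show (pvIdx r c + pvCostA t rest == pvValR k prev (r :: rest)) = _
              rw [← hfc]
              simp only [beq_eq_decide]
              rw [decide_eq_decide]
              omega
            rw [pvFind?_ext _ _ _ hext]
            exact ih c (fun hr => hne' hr c) ht'
          rw [hinner]
          have : (pvIdx r c + pvValR k c rest == pvValR k prev (r :: rest)) = true := by
            rw [beq_iff_eq]; exact hfc
          rw [this]
          rfl
        · -- this block contains no minimum-cost coloring
          have hnone : ((pvFeasList k c rest.length).find?
              ((fun l => pvCostA l (r :: rest) == pvValR k prev (r :: rest)) ∘ (c :: ·)))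
              = none := by
            rw [List.find?_eq_none]
            intro t htmem
            show ¬ (pvIdx r c + pvCostA t rest == pvValR k prev (r :: rest)) = true
            rw [beq_iff_eq]
            have h1 := pvVal_lower rest c t htmem
            have h2 := hcs c List.mem_cons_self
            rw [beq_iff_eq] at hfc
            omega
          rw [hnone, Option.map_none, Option.none_or]
          have hfc' : (pvIdx r c + pvValR k c rest == pvValR k prev (r :: rest)) = false := by
            simpa using hfc
          rw [hfc']
          exact ihcs (fun d hd => hcs d (List.mem_cons_of_mem _ hd))
    rw [List.length_cons, pvFeasList_succ, aux _ hlow]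
    obtain ⟨cstar, hcs, hfcs⟩ := List.mem_map.mp (pvMinI_spec hmapne).1
    have hsome : ∃ c ∈ pvCand k prev,
        (pvIdx r c + pvValR k c rest == pvValR k prev (r :: rest)) = true := by
      refine ⟨cstar, hcs, ?_⟩
      rw [beq_iff_eq]
      exact hfcs
    obtain ⟨c0, hc0⟩ := Option.isSome_iff_exists.mp (List.find?_isSome.mpr hsome)
    rw [hc0, pvPickR, hc0]
    rfl

theorem pvGetD_index {α β : Type} [DecidableEq β] (l : List α) (f : α → β) (m : β) (d : α)
    (hm : m ∈ l.map f) :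
    l.getD ((PySem.List.index? (l.map f) m).getD 0) d
      = ((l.find? (fun x => f x == m)).getD d) := by
  induction l with
  | nil => simp at hm
  | cons x xs ih =>
    by_cases h : f x = m
    · rw [List.map_cons, h, PySem.List.index?_cons_self]
      simp [h]
    · rw [List.map_cons, PySem.List.index?_cons_of_ne _ h]
      have hm' : m ∈ xs.map f := by
        rcases List.mem_cons.mp hm with h2 | h2
        · exact absurd h2.symm h
        · exact h2
      obtain ⟨i, hi⟩ := Option.isSome_iff_exists.mp
        ((PySem.List.index?_isSome_iff (xs.map f) m).mpr hm')
      have hfind : (x :: xs).find? (fun x => f x == m) = xs.find? (fun x => f x == m) := by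
        simp [h]
      rw [hi, hfind]
      have := ih hm'
      rw [hi] at this
      simpa using this

theorem pvIdx_map_pyRange {k : Int} (f : Int → Int) {c : Int} (h0 : 0 ≤ c) (hk : c < k) :
    pvIdx ((PySem.List.pyRange 0 k 1).map f) c = f c := by
  unfold pvIdx
  exact PySem.List.pyGetD_map_pyRange_of_nonneg f k c 0 h0 hk

theorem pvSufB_eq {k : Int} : ∀ (rest : List (List Int)) (r : List Int), (2 ≤ k ∨ rest = []) →
    pvSufB k (r :: rest) = ((PySem.List.pyRange 0 k 1).map (fun c => pvIdx r c + pvValR k c rest))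
      :: pvSufB k rest := by
  intro rest
  induction rest with
  | nil =>
    intro r _
    show [(PySem.List.pyRange 0 k 1).map (fun c => pvIdx r c)] = _
    rw [pvSufB]
    congr 1
    apply List.map_congr_left
    intro c _
    show pvIdx r c = pvIdx r c + pvValR k c []
    rw [pvValR, add_zero]
  | cons r2 rest2 ih =>
    intro r h
    have hk2 : 2 ≤ k := by
      rcases h with h | h
      · exact h
      · exact absurd h (List.cons_ne_nil _ _)
    have hrec := ih r2 (Or.inl hk2)
    rw [pvSufB, hrec]
    dsimp only
    congr 1
    apply List.map_congr_left
    intro c hc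
    rw [PySem.List.mem_pyRange_one] at hc
    congr 1
    show pvMinI (((PySem.List.pyRange 0 k 1).filter (fun d => d != c)).map
        (fun d => pvIdx ((PySem.List.pyRange 0 k 1).map (fun d => pvIdx r2 d + pvValR k d rest2)) d))
      = pvValR k c (r2 :: rest2)
    have hmap : (((PySem.List.pyRange 0 k 1).filter (fun d => d != c)).map
        (fun d => pvIdx ((PySem.List.pyRange 0 k 1).map (fun d => pvIdx r2 d + pvValR k d rest2)) d))
        = (pvCand k c).map (fun d => pvIdx r2 d + pvValR k d rest2) := by
      apply List.map_congr_left
      intro d hd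
      have hd' := (List.mem_filter.mp hd).1
      rw [PySem.List.mem_pyRange_one] at hd'
      exact pvIdx_map_pyRange _ hd'.1 hd'.2
    rw [hmap]
    rfl

theorem pvRecon_eq {k : Int} : ∀ (rows : List (List Int)) (prev rem : Int),
    (rows ≠ [] → pvCand k prev ≠ []) → (2 ≤ k ∨ rows.length ≤ 1) →
    rem = pvValR k prev rows →
    pvReconB k (List.zip rows (pvSufB k rows)) prev rem = pvPickR k prev rows := by
  intro rows
  induction rows with
  | nil => intro prev rem _ _ _; rfl
  | cons r rest ih =>
    intro prev rem hne ht hrem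
    have hrestnil : 2 ≤ k ∨ rest = [] := by
      rcases ht with h | h
      · exact Or.inl h
      · right
        simp only [List.length_cons] at h
        exact List.length_eq_zero_iff.mp (by omega)
    rw [pvSufB_eq rest r hrestnil, List.zip_cons_cons]
    rw [pvReconB]
    have hcand : pvCand k prev ≠ [] := hne (List.cons_ne_nil _ _)
    -- the find? over the full range equals find? with the reference predicate
    have hext : (PySem.List.pyRange 0 k 1).find?
        (fun c => c != prev && pvIdx ((PySem.List.pyRange 0 k 1).map
          (fun c => pvIdx r c + pvValR k c rest)) c == rem)
        = (PySem.List.pyRange 0 k 1).find?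
          (fun c => c != prev && (pvIdx r c + pvValR k c rest == pvValR k prev (r :: rest))) := by
      apply pvFind?_ext
      intro c hc
      rw [PySem.List.mem_pyRange_one] at hc
      rw [pvIdx_map_pyRange _ hc.1 hc.2, hrem]
    have hfilter : (pvCand k prev).find?
          (fun c => pvIdx r c + pvValR k c rest == pvValR k prev (r :: rest))
        = (PySem.List.pyRange 0 k 1).find?
          (fun c => c != prev && (pvIdx r c + pvValR k c rest == pvValR k prev (r :: rest))) := by
      unfold pvCand
      exact pvFind?_filter _ _ _
    -- find? succeeds: some candidate attains the minimum
    have hmapne : (pvCand k prev).map (fun c => pvIdx r c + pvValR k c rest) ≠ [] := by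
      simpa using hcand
    obtain ⟨cstar, hcs, hfcs⟩ := List.mem_map.mp (pvMinI_spec hmapne).1
    have hsome : ∃ c ∈ pvCand k prev,
        (pvIdx r c + pvValR k c rest == pvValR k prev (r :: rest)) = true := by
      refine ⟨cstar, hcs, ?_⟩
      show _ = true
      rw [beq_iff_eq]
      exact hfcs
    obtain ⟨c0, hc0⟩ := Option.isSome_iff_exists.mp (List.find?_isSome.mpr hsome)
    have hc0mem := List.mem_of_find?_eq_some hc0
    have hc0val : pvIdx r c0 + pvValR k c0 rest = pvValR k prev (r :: rest) := by
      have := List.find?_some hc0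
      rwa [beq_iff_eq] at this
    rw [hext, ← hfilter, hc0]
    show (c0 :: pvReconB k (List.zip rest (pvSufB k rest)) c0 (rem - pvIdx r c0)) = _
    have hne' : rest ≠ [] → pvCand k c0 ≠ [] := by
      intro hr
      have hk2 : 2 ≤ k := by
        rcases hrestnil with h | h
        · exact h
        · exact absurd h hr
      exact pvCand_ne_nil (Or.inl hk2)
    have ht' : 2 ≤ k ∨ rest.length ≤ 1 := by
      rcases ht with h | h
      · exact Or.inl h
      · right; simp only [List.length_cons] at h; omega
    have hrem' : rem - pvIdx r c0 = pvValR k c0 rest := by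
      rw [hrem, ← hc0val]; ring
    rw [ih c0 _ hne' ht' hrem']
    rw [pvPickR, hc0]
    rfl

theorem pvCand_neg_one {k : Int} : pvCand k (-1) = PySem.List.pyRange 0 k 1 := by
  unfold pvCand
  apply List.filter_eq_self.mpr
  intro c hc
  rw [PySem.List.mem_pyRange_one] at hc
  simp
  omega

theorem pvA_eq {r : List Int} {rest : List (List Int)}
    (hk1 : (1:Int) ≤ (r.length : Int)) (ht : 2 ≤ (r.length : Int) ∨ (r :: rest).length ≤ 1) :
    min_cost_vertex_coloring_enumeration (r :: rest)
      = (pvValR (r.length : Int) (-1) (r :: rest), pvPickR (r.length : Int) (-1) (r :: rest)) := by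
  have hne : (r :: rest) ≠ [] → pvCand (r.length : Int) (-1) ≠ [] :=
    fun _ => pvCand_ne_nil (Or.inr ⟨hk1, by norm_num⟩)
  unfold min_cost_vertex_coloring_enumeration
  rw [PySem.List.pyGet?_zero_cons]
  dsimp only [Option.getD_some]
  rw [pvFilter_feasA]
  have hmin : pvMinI (((pvFeasList (r.length : Int) (-1) (r :: rest).length).map
      (fun comb => pvCostA comb (r :: rest)))) = pvValR (r.length : Int) (-1) (r :: rest) :=
    pvVal_min (r :: rest) (-1) hne ht
  have hMinI : ∀ (l : List Int), (PySem.List.min? l (fun x => x)).getD 0 = pvMinI l :=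
    fun _ => rfl
  rw [hMinI, hmin]
  have hmem : pvValR (r.length : Int) (-1) (r :: rest) ∈
      (pvFeasList (r.length : Int) (-1) (r :: rest).length).map (fun comb => pvCostA comb (r :: rest)) := by
    obtain ⟨l, hl, hcost⟩ := pvVal_attain (r :: rest) (-1) hne ht
    exact List.mem_map.mpr ⟨l, hl, hcost⟩
  rw [pvGetD_index _ _ _ _ hmem, pvPick_first (r :: rest) (-1) hne ht]
  rfl

theorem pvB_eq {r : List Int} {rest : List (List Int)}
    (hk1 : (1:Int) ≤ (r.length : Int)) (ht : 2 ≤ (r.length : Int) ∨ (r :: rest).length ≤ 1) :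
    min_cost_vertex_coloring_enumeration_alt (r :: rest)
      = (pvValR (r.length : Int) (-1) (r :: rest), pvPickR (r.length : Int) (-1) (r :: rest)) := by
  have hne : (r :: rest) ≠ [] → pvCand (r.length : Int) (-1) ≠ [] :=
    fun _ => pvCand_ne_nil (Or.inr ⟨hk1, by norm_num⟩)
  have hrestnil : 2 ≤ (r.length : Int) ∨ rest = [] := by
    rcases ht with h | h
    · exact Or.inl h
    · right
      simp only [List.length_cons] at h
      exact List.length_eq_zero_iff.mp (by omega)
  unfold min_cost_vertex_coloring_enumeration_alt
  rw [PySem.List.pyGet?_zero_cons]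
  dsimp only [Option.getD_some]
  have htotal : (PySem.List.min? (PySem.List.pyGetD (pvSufB (r.length : Int) (r :: rest)) 0 [])
      (fun x => x)).getD 0 = pvValR (r.length : Int) (-1) (r :: rest) := by
    rw [pvSufB_eq rest r hrestnil, PySem.List.pyGetD_zero_cons]
    show pvMinI _ = _
    show _ = pvMinI ((pvCand (r.length : Int) (-1)).map
      (fun c => pvIdx r c + pvValR (r.length : Int) c rest))
    rw [pvCand_neg_one]
  rw [htotal]
  rw [pvRecon_eq (r :: rest) (-1) _ hne ht rfl]

-- ===== VERDICT (by name: the statement is the Claim_ definition above) =====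
theorem min_cost_vertex_coloring_enumeration_spec : Claim_equal_min_cost_vertex_coloring_enumeration := by
  intro costs _ hpre
  obtain ⟨hnil, hk1, hkor, _⟩ := hpre
  unfold Spec_min_cost_vertex_coloring_enumeration
  cases costs with
  | nil => exact absurd rfl hnil
  | cons r rest =>
    simp only [List.headD_cons] at hk1 hkor
    have hk1' : (1:Int) ≤ (r.length : Int) := by exact_mod_cast hk1
    have ht : 2 ≤ (r.length : Int) ∨ (r :: rest).length ≤ 1 := by
      rcases hkor with h | h
      · left; exact_mod_cast h
      · right; omega
    rw [pvA_eq hk1' ht, pvB_eq hk1' ht]
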